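-- pv_equiv track=rewrite | github.com/germanrud/python-algo-1 | practica6.py | peso_pino_while
-- ===== SOURCE A (Python) =====
-- def peso_pino_while (alt : int) -> int:
--     x = alt
--     peso = 0
--     while x!=0:
--         if x>3:
--             peso = peso + 200
--             x = x-1
--         else:
--             peso = peso + 300
--             x = x-1
--
--     return (peso)
-- ===== SOURCE B (Python) =====
-- def peso_pino_while(alt: int) -> int:
--     # closed form: alt-3 sections of 200 plus 3 of 300 when alt>3, else 300 each
--     if alt > 3:
--         return 200 * alt + 300
--     return 300 * alt
-- ===== Notes on version B (the rewrite author's own statement) =====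
-- stated objective: faster
-- what changed: Replaced the O(alt) count-down while loop with a closed-form arithmetic expression (200*alt+300 for alt>3, else 300*alt).
-- outside the precondition, e.g. on peso_pino_while(-1): A does not finish within the time limit, B returns -300
import Mathlib
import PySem

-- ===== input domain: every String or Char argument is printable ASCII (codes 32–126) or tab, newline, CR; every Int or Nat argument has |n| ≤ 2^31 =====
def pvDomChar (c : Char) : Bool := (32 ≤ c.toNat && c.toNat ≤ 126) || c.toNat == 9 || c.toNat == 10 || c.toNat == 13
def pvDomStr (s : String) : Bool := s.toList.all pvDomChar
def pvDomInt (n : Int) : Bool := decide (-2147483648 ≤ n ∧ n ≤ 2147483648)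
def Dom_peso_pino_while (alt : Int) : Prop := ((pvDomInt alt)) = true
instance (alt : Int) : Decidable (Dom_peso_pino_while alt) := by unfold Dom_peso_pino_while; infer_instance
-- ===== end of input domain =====

-- B replaces A's O(alt) count-down loop by a closed-form expression (faster; asymptotic).


-- ===== PORT A =====
-- A's while loop, transliterated with fuel = alt.toNat (for alt ≥ 0, exactly the number
-- of iterations Python performs; for alt < 0 Python diverges, excluded by Pre_).
def pesoLoop : Nat → Int → Int → Int
  | 0, _, peso => peso
  | fuel + 1, x, peso =>
    if x ≠ 0 then
      if x > 3 then pesoLoop fuel (x - 1) (peso + 200)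
      else pesoLoop fuel (x - 1) (peso + 300)
    else peso

def peso_pino_while (alt : Int) : Int := pesoLoop alt.toNat alt 0

-- ===== PORT B =====
def peso_pino_while_alt (alt : Int) : Int :=
  if alt > 3 then 200 * alt + 300 else 300 * alt

-- ===== PRECONDITION & SPEC =====
-- Pre_ excludes negative alt, on which A's while loop never terminates (x only decreases and never reaches the stop value).
def Pre_peso_pino_while (alt : Int) : Prop := 0 ≤ alt
instance (alt : Int) : Decidable (Pre_peso_pino_while alt) := by unfold Pre_peso_pino_while; infer_instance
def pvWitness_peso_pino_while : Int := (5)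
def Spec_peso_pino_while (alt : Int) (out : Int) : Prop := out = peso_pino_while_alt alt
instance (alt : Int) (out : Int) : Decidable (Spec_peso_pino_while alt out) := by unfold Spec_peso_pino_while; infer_instance

-- ===== CLAIM (what is proved, stated in full; the proofs are below) =====
def Claim_equal_peso_pino_while : Prop := ∀ (alt : Int), Dom_peso_pino_while alt → Pre_peso_pino_while alt → Spec_peso_pino_while alt (peso_pino_while alt)

-- ===== LEMMAS AND PROOFS =====
lemma pesoLoop_closed (n : Nat) : ∀ peso : Int,
    pesoLoop n (n : Int) peso = peso + (if (n : Int) > 3 then 200 * n + 300 else 300 * n) := by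
  induction n with
  | zero => intro peso; simp [pesoLoop]
  | succ k ih =>
    intro peso
    have hx : ((k + 1 : Nat) : Int) ≠ 0 := by push_cast; omega
    have hstep : ((k + 1 : Nat) : Int) - 1 = (k : Int) := by push_cast; ring
    simp only [pesoLoop, hx, if_true, ne_eq, not_false_eq_true, hstep]
    by_cases hk : ((k + 1 : Nat) : Int) > 3
    · rw [if_pos hk, ih]
      push_cast at hk ⊢
      split_ifs <;> omega
    · rw [if_neg hk, ih]
      push_cast at hk ⊢
      split_ifs <;> omega

-- ===== VERDICT (by name: the statement is the Claim_ definition above) =====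
theorem peso_pino_while_spec : Claim_equal_peso_pino_while := by
  intro alt _ hpre
  obtain ⟨n, rfl⟩ : ∃ n : Nat, alt = (n : Int) := ⟨alt.toNat, (Int.toNat_of_nonneg hpre).symm⟩
  unfold Spec_peso_pino_while peso_pino_while peso_pino_while_alt
  rw [Int.toNat_natCast, pesoLoop_closed]
  split_ifs <;> push_cast <;> ring
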